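-- pv_equiv track=rewrite | github.com/stanislav-zhurich/ai-school-prompt-engineering | comparator.py | _collapse_resume
-- ===== SOURCE A (Python) =====
-- def _collapse_resume(user_message: str) -> str:
--     """
--     Replace the embedded resume block with a placeholder so the prompt
--     instructions are readable without the candidate's data.
--
--     Strategy: find where the post-resume instructions begin by scanning
--     for known instruction-opener words. Everything between the opening
--     instruction line and that marker is the resume and gets replaced.
--     """
--     instruction_markers = [
--         "\nFollow",
--         "\nPlease",
--         "\nReturn",
--         "\nStep 1",
--         "\nProvide",
--     ]
--
--     instruction_start = None
--     for marker in instruction_markers: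
--         pos = user_message.find(marker)
--         if pos != -1 and (instruction_start is None or pos < instruction_start):
--             instruction_start = pos
--
--     opening = user_message.split("\n")[0]
--
--     if instruction_start is not None:
--         instructions = user_message[instruction_start:].lstrip("\n")
--         return f"{opening}\n\n[... resume content ...]\n\n{instructions}"
--
--     # No instruction markers found (e.g. bad prompt with no follow-up text)
--     return f"{opening}\n\n[... resume content ...]"
-- ===== SOURCE B (Python) =====
-- _MARKER_TAILS = ("Follow", "Please", "Return", "Step 1", "Provide")
--
--
-- def _collapse_resume(user_message: str) -> str:
--     opening = user_message.split("\n")[0]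
--     for i in range(len(user_message)):
--         if user_message[i] == "\n" and user_message.startswith(_MARKER_TAILS, i + 1):
--             instructions = user_message[i:].lstrip("\n")
--             return f"{opening}\n\n[... resume content ...]\n\n{instructions}"
--     return f"{opening}\n\n[... resume content ...]"
-- ===== Notes on version B (the rewrite author's own statement) =====
-- stated objective: alternative
-- what changed: A runs five separate whole-string .find passes (one per marker) and tracks the minimum position; B makes one left-to-right scan and stops at the first index where a newline is immediately followed by one of the five marker words (the leftmost match), with identical output formatting.
import Mathlib
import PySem

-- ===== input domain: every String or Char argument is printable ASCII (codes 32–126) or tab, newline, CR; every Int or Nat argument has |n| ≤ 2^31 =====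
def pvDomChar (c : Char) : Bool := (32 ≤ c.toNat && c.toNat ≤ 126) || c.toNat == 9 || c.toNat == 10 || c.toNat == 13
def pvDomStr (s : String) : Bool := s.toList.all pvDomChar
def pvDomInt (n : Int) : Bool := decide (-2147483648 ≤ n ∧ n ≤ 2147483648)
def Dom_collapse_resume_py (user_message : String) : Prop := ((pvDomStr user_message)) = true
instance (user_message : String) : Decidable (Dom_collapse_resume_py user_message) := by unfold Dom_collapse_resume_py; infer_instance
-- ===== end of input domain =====

-- B replaces A's five whole-string `.find` passes + running minimum by ONE left-to-right scan
-- that stops at the first '\n' followed by a marker word (objective: alternative single-pass traversal).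

-- ===== PORT A =====
-- the body of A's `for marker in instruction_markers` loop (min-tracking via Option)
def pvMinFindStep (s : List Char) (acc : Option Int) (marker : List Char) : Option Int :=
  let pos := PySem.Chars.find s marker
  if pos != -1 && (match acc with | none => true | some a => decide (pos < a)) then some pos
  else acc

def collapse_resume_py (user_message : String) : String :=
  let s := user_message.toList
  let instruction_markers : List (List Char) :=
    ["\nFollow".toList, "\nPlease".toList, "\nReturn".toList, "\nStep 1".toList, "\nProvide".toList]
  let instruction_start := instruction_markers.foldl (pvMinFindStep s) none
  let opening := (PySem.Chars.splitOn s ['\n']).headD []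
  match instruction_start with
  | some p =>
      -- user_message[instruction_start:].lstrip("\n"): dropWhile (· == '\n') is exactly lstrip("\n")
      let instructions := (PySem.List.slice s (some p) none).dropWhile (· == '\n')
      String.ofList (opening ++ "\n\n[... resume content ...]\n\n".toList ++ instructions)
  | none => String.ofList (opening ++ "\n\n[... resume content ...]".toList)

-- ===== PORT B =====
def pvTails : List (List Char) :=
  ["Follow".toList, "Please".toList, "Return".toList, "Step 1".toList, "Provide".toList]

-- B's single scan: `for i in range(len(s)): if s[i]=='\n' and s.startswith(tails, i+1): return i`
def pvScanB : List Char → Nat → Option Nat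
  | [], _ => none
  | c :: rest, i =>
      if c == '\n' && pvTails.any (fun t => t.isPrefixOf rest) then some i
      else pvScanB rest (i + 1)

def collapse_resume_py_alt (user_message : String) : String :=
  let s := user_message.toList
  let opening := (PySem.Chars.splitOn s ['\n']).headD []
  match pvScanB s 0 with
  | some i =>
      -- user_message[i:].lstrip("\n"): dropWhile (· == '\n') is exactly lstrip("\n")
      let instructions := (PySem.List.slice s (some (i : Int)) none).dropWhile (· == '\n')
      String.ofList (opening ++ "\n\n[... resume content ...]\n\n".toList ++ instructions)
  | none => String.ofList (opening ++ "\n\n[... resume content ...]".toList)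

-- ===== PRECONDITION & SPEC =====
def Spec_collapse_resume_py (user_message : String) (out : String) : Prop := out = collapse_resume_py_alt user_message
instance (user_message : String) (out : String) : Decidable (Spec_collapse_resume_py user_message out) := by unfold Spec_collapse_resume_py; infer_instance

-- ===== CLAIM (what is proved, stated in full; the proofs are below) =====
def Claim_equal_collapse_resume_py : Prop := ∀ (user_message : String), Dom_collapse_resume_py user_message → Spec_collapse_resume_py user_message (collapse_resume_py user_message)

-- ===== LEMMAS AND PROOFS =====

def pvMarkers : List (List Char) :=
  ["\nFollow".toList, "\nPlease".toList, "\nReturn".toList, "\nStep 1".toList, "\nProvide".toList]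

-- "some marker occurs at position j of s"
def pvQ (s : List Char) (j : Nat) : Prop := ∃ m ∈ pvMarkers, m <+: s.drop j

lemma pvMarkers_eq : pvMarkers = pvTails.map (fun t => '\n' :: t) := by decide

lemma pvCond_iff (c : Char) (rest : List Char) :
    (c == '\n' && pvTails.any (fun t => t.isPrefixOf rest)) = true ↔ pvQ (c :: rest) 0 := by
  simp only [pvQ, pvMarkers_eq, List.mem_map, Bool.and_eq_true, beq_iff_eq,
    List.any_eq_true, List.drop_zero]
  constructor
  · rintro ⟨hc, t, ht, hp⟩
    exact ⟨'\n' :: t, ⟨t, ht, rfl⟩, by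
      rw [hc]; exact List.cons_prefix_cons.mpr ⟨rfl, List.isPrefixOf_iff_prefix.mp hp⟩⟩
  · rintro ⟨m, ⟨t, ht, rfl⟩, hp⟩
    rcases List.cons_prefix_cons.mp hp with ⟨hc, hpre⟩
    exact ⟨hc.symm, t, ht, List.isPrefixOf_iff_prefix.mpr hpre⟩

lemma pvQ_succ (c : Char) (rest : List Char) (j : Nat) : pvQ (c :: rest) (j + 1) ↔ pvQ rest j := by
  simp [pvQ]

lemma pvScan_none : ∀ (l : List Char) (i : Nat), pvScanB l i = none ↔ ∀ j, ¬ pvQ l j := by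
  intro l
  induction l with
  | nil =>
      intro i
      simp only [pvScanB, true_iff]
      intro j ⟨m, hm, hp⟩
      rw [List.drop_nil, List.prefix_nil] at hp
      subst hp; revert hm; decide
  | cons c rest ih =>
      intro i
      by_cases h : (c == '\n' && pvTails.any (fun t => t.isPrefixOf rest)) = true
      · simp only [pvScanB, h, if_true]
        constructor
        · intro hcontra; exact absurd hcontra (by simp)
        · intro hall; exact absurd ((pvCond_iff c rest).mp h) (hall 0)
      · simp only [pvScanB, h, if_false, Bool.false_eq_true, ih (i + 1)]
        constructor
        · intro hall j
          cases j with
          | zero => exact fun hq => h ((pvCond_iff c rest).mpr hq)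
          | succ j' => exact fun hq => hall j' ((pvQ_succ c rest j').mp hq)
        · intro hall j hq
          exact hall (j + 1) ((pvQ_succ c rest j).mpr hq)

lemma pvScan_some : ∀ (l : List Char) (i k : Nat), pvScanB l i = some k →
    i ≤ k ∧ pvQ l (k - i) ∧ ∀ j < k - i, ¬ pvQ l j := by
  intro l
  induction l with
  | nil => intro i k h; simp [pvScanB] at h
  | cons c rest ih =>
      intro i k h
      by_cases hc : (c == '\n' && pvTails.any (fun t => t.isPrefixOf rest)) = true
      · simp only [pvScanB, hc, if_true, Option.some.injEq] at h
        subst h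
        refine ⟨le_refl _, ?_, by omega⟩
        simpa using (pvCond_iff c rest).mp hc
      · simp only [pvScanB, hc, if_false, Bool.false_eq_true] at h
        obtain ⟨hik, hq, hmin⟩ := ih (i + 1) k h
        refine ⟨by omega, ?_, ?_⟩
        · have : k - i = (k - (i + 1)) + 1 := by omega
          rw [this]; exact (pvQ_succ c rest _).mpr hq
        · intro j hj
          cases j with
          | zero => exact fun hq0 => hc ((pvCond_iff c rest).mpr hq0)
          | succ j' =>
              intro hq'
              exact hmin j' (by omega) ((pvQ_succ c rest j').mp hq')

lemma pvStep_cases (s : List Char) (acc : Option Int) (m : List Char) :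
    (pvMinFindStep s acc m = some (PySem.Chars.find s m) ∧ PySem.Chars.find s m ≠ -1 ∧
      ∀ a, acc = some a → PySem.Chars.find s m < a) ∨
    (pvMinFindStep s acc m = acc ∧
      (PySem.Chars.find s m = -1 ∨ ∃ a, acc = some a ∧ a ≤ PySem.Chars.find s m)) := by
  cases acc with
  | none =>
      by_cases h : PySem.Chars.find s m = -1
      · right
        refine ⟨?_, Or.inl h⟩
        simp [pvMinFindStep, h]
      · left
        refine ⟨?_, h, by simp⟩
        simp [pvMinFindStep, h]
  | some a =>
      by_cases h : PySem.Chars.find s m = -1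
      · right
        refine ⟨?_, Or.inl h⟩
        simp [pvMinFindStep, h]
      · by_cases hlt : PySem.Chars.find s m < a
        · left
          refine ⟨?_, h, ?_⟩
          · simp [pvMinFindStep, h, hlt]
          · intro a' ha'
            injection ha' with ha'
            omega
        · right
          refine ⟨?_, Or.inr ⟨a, rfl, by omega⟩⟩
          simp [pvMinFindStep, hlt]

lemma pvFold_none (s : List Char) : ∀ (ms : List (List Char)) (acc : Option Int),
    ms.foldl (pvMinFindStep s) acc = none ↔ acc = none ∧ ∀ m ∈ ms, PySem.Chars.find s m = -1 := by
  intro ms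
  induction ms with
  | nil => intro acc; simp
  | cons m ms ih =>
      intro acc
      rw [List.foldl_cons, ih (pvMinFindStep s acc m)]
      rcases pvStep_cases s acc m with ⟨hstep, hne, -⟩ | ⟨hstep, hside⟩
      · rw [hstep]
        constructor
        · rintro ⟨h, -⟩; exact absurd h (by simp)
        · rintro ⟨-, hall⟩; exact absurd (hall m (List.mem_cons_self ..)) hne
      · rw [hstep]
        constructor
        · rintro ⟨hacc, hall⟩
          refine ⟨hacc, fun m' hm' => ?_⟩
          rcases List.mem_cons.mp hm' with rfl | hm'
          · rcases hside with h | ⟨a, ha, -⟩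
            · exact h
            · rw [hacc] at ha; cases ha
          · exact hall m' hm'
        · rintro ⟨hacc, hall⟩
          exact ⟨hacc, fun m' hm' => hall m' (List.mem_cons_of_mem _ hm')⟩

lemma pvFold_some (s : List Char) : ∀ (ms : List (List Char)) (acc : Option Int) (v : Int),
    ms.foldl (pvMinFindStep s) acc = some v →
    (acc = some v ∨ ∃ m ∈ ms, PySem.Chars.find s m = v ∧ v ≠ -1) ∧
    (∀ a, acc = some a → v ≤ a) ∧
    (∀ m ∈ ms, PySem.Chars.find s m ≠ -1 → v ≤ PySem.Chars.find s m) := by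
  intro ms
  induction ms with
  | nil =>
      intro acc v h
      simp only [List.foldl_nil] at h
      refine ⟨Or.inl h, ?_, by simp⟩
      intro a ha
      rw [h] at ha
      injection ha with h2
      omega
  | cons m ms ih =>
      intro acc v h
      rw [List.foldl_cons] at h
      obtain ⟨hsrc, hle, hall⟩ := ih (pvMinFindStep s acc m) v h
      rcases pvStep_cases s acc m with ⟨hstep, hne, hlt⟩ | ⟨hstep, hside⟩
      · rw [hstep] at hsrc hle
        have hvm : v ≤ PySem.Chars.find s m := hle _ rfl
        refine ⟨?_, ?_, ?_⟩
        · rcases hsrc with heq | ⟨m', hm', hfv', hne'⟩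
          · have hfv : PySem.Chars.find s m = v := by injection heq
            exact Or.inr ⟨m, List.mem_cons_self .., hfv, hfv ▸ hne⟩
          · exact Or.inr ⟨m', List.mem_cons_of_mem _ hm', hfv', hne'⟩
        · intro a ha
          have h1 := hlt a ha
          omega
        · intro m' hm' hne'
          rcases List.mem_cons.mp hm' with rfl | hm'
          · exact hvm
          · exact hall m' hm' hne'
      · rw [hstep] at hsrc hle
        refine ⟨?_, hle, ?_⟩
        · rcases hsrc with heq | ⟨m', hm', hfv', hne'⟩
          · exact Or.inl heq
          · exact Or.inr ⟨m', List.mem_cons_of_mem _ hm', hfv', hne'⟩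
        intro m' hm' hne'
        rcases List.mem_cons.mp hm' with rfl | hm'
        · rcases hside with h1 | ⟨a, ha, hale⟩
          · exact absurd h1 hne'
          · have := hle a ha
            omega
        · exact hall m' hm' hne'

-- a marker at position j bounds find from above
lemma pvFind_le_of_prefix (s m : List Char) (j : Nat) (hp : m <+: s.drop j) :
    PySem.Chars.find s m ≠ -1 ∧ (PySem.Chars.find s m).toNat ≤ j := by
  have hin : m <:+: s :=
    (PySem.Chars.isIn_iff_infix m s).mp ((PySem.Chars.exists_prefix_drop_iff_isIn m s).mp ⟨j, hp⟩)
  have hne : PySem.Chars.find s m ≠ -1 := (PySem.Chars.find_ne_neg_one_iff s m).mpr hin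
  have hnn : 0 ≤ PySem.Chars.find s m := (PySem.Chars.find_nonneg_iff s m).mpr hin
  refine ⟨hne, ?_⟩
  by_contra hlt
  exact (PySem.Chars.find_spec hnn).2 j (by omega) hp

-- the core bridge: A's fold equals B's scan
lemma pvFold_eq_scan (s : List Char) :
    pvMarkers.foldl (pvMinFindStep s) none = (pvScanB s 0).map Int.ofNat := by
  cases hscan : pvScanB s 0 with
  | none =>
      have hnoQ := (pvScan_none s 0).mp hscan
      rw [Option.map_none]
      rw [pvFold_none]
      refine ⟨rfl, fun m hm => ?_⟩
      rw [PySem.Chars.find_eq_neg_one_iff]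
      intro hin
      obtain ⟨j, hp⟩ := (PySem.Chars.exists_prefix_drop_iff_isIn m s).mpr
        ((PySem.Chars.isIn_iff_infix m s).mpr hin)
      exact hnoQ j ⟨m, hm, hp⟩
  | some k =>
      obtain ⟨-, hQ, hmin⟩ := pvScan_some s 0 k hscan
      rw [Nat.sub_zero] at hQ hmin
      rw [Option.map_some]
      cases hfold : pvMarkers.foldl (pvMinFindStep s) none with
      | none =>
          obtain ⟨-, hall⟩ := (pvFold_none s pvMarkers none).mp hfold
          obtain ⟨m, hm, hp⟩ := hQ
          exact absurd (hall m hm) (pvFind_le_of_prefix s m k hp).1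
      | some v =>
          obtain ⟨hsrc, -, hble⟩ := pvFold_some s pvMarkers none v hfold
          rcases hsrc with heq | ⟨m, hm, hfv, hne⟩
          · exact absurd heq (by simp)
          · have hnn : 0 ≤ v := by
              have := PySem.Chars.neg_one_le_find s m
              omega
            -- v points at a marker occurrence
            have hQv : pvQ s v.toNat := by
              have := (PySem.Chars.find_spec (s := s) (sub := m) (by omega)).1
              rw [hfv] at this
              exact ⟨m, hm, this⟩
            -- k is minimal, so k ≤ v.toNat
            have hkv : k ≤ v.toNat := by
              by_contra hlt
              exact hmin v.toNat (by omega) hQv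
            -- and v ≤ find s m' ≤ k for the marker at k
            obtain ⟨m', hm', hp'⟩ := hQ
            obtain ⟨hne', hle'⟩ := pvFind_le_of_prefix s m' k hp'
            have hvk : v.toNat ≤ k := by
              have h1 := hble m' hm' hne'
              have h2 := PySem.Chars.neg_one_le_find s m'
              omega
            have hveq : v.toNat = k := by omega
            simp only [Option.some.injEq]
            rw [← hveq]
            exact (Int.toNat_of_nonneg hnn).symm

-- ===== VERDICT (by name: the statement is the Claim_ definition above) =====
theorem collapse_resume_py_spec : Claim_equal_collapse_resume_py := by
  intro user_message _
  unfold Spec_collapse_resume_py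
  show collapse_resume_py user_message = collapse_resume_py_alt user_message
  have h : (["\nFollow".toList, "\nPlease".toList, "\nReturn".toList,
      "\nStep 1".toList, "\nProvide".toList] : List (List Char)) = pvMarkers := rfl
  simp only [collapse_resume_py, collapse_resume_py_alt]
  rw [h, pvFold_eq_scan]
  cases pvScanB user_message.toList 0 <;> rfl
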